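-- pv_equiv track=rewrite | github.com/Ponolp/Security-protocols-coursework | utils.py | map_dinucleotide_to_int
-- ===== SOURCE A (Python) =====
-- from typing import List, Tuple
--
-- def map_dinucleotide_to_int(dinucleotides: List[str]) -> List[int]:
--     dinu_map = {
--         "AA": 1, "AC": 2, "AG": 3, "AT": 4,
--         "CA": 5, "CC": 6, "CG": 7, "CT": 8,
--         "GA": 9, "GC": 10, "GG": 11, "GT": 12,
--         "TA": 13, "TC": 14, "TG": 15, "TT": 16
--     }
--     return [dinu_map.get(dinu, 0) for dinu in dinucleotides]
-- ===== SOURCE B (Python) =====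
-- def map_dinucleotide_to_int(dinucleotides):
--     idx = {"A": 0, "C": 1, "G": 2, "T": 3}
--     result = []
--     for dinu in dinucleotides:
--         if len(dinu) == 2 and dinu[0] in idx and dinu[1] in idx:
--             result.append(4 * idx[dinu[0]] + idx[dinu[1]] + 1)
--         else:
--             result.append(0)
--     return result
-- ===== Notes on version B (the rewrite author's own statement) =====
-- stated objective: idiomatic
-- what changed: Replaces the 16-entry dinucleotide lookup table with a 4-entry single-nucleotide index and an arithmetic base-4 encoding 4*idx[first]+idx[second]+1 computed in one pass.
import Mathlib
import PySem

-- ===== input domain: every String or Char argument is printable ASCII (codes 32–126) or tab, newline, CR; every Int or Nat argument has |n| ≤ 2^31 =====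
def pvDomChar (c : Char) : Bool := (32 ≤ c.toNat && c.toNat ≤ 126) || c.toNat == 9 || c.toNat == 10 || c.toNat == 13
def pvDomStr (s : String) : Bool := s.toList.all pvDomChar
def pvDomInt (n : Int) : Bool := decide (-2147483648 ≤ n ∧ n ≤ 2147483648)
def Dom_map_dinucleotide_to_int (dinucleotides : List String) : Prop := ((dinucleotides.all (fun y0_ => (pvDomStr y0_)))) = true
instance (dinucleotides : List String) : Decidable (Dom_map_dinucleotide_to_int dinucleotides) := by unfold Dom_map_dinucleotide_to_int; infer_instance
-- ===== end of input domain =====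

-- B replaces A's 16-entry dinucleotide lookup table by a 4-entry single-nucleotide index and the
-- arithmetic base-4 encoding 4*idx[first]+idx[second]+1 (objective: idiomatic; same O(n) cost).


-- ===== PORT A =====
-- the dict literal `dinu_map` of A
def dinuMap : PySem.Dict String Int := PySem.Dict.ofList
  [("AA", 1), ("AC", 2), ("AG", 3), ("AT", 4),
   ("CA", 5), ("CC", 6), ("CG", 7), ("CT", 8),
   ("GA", 9), ("GC", 10), ("GG", 11), ("GT", 12),
   ("TA", 13), ("TC", 14), ("TG", 15), ("TT", 16)]

def map_dinucleotide_to_int (dinucleotides : List String) : List Int :=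
  dinucleotides.map (fun dinu => dinuMap.getD dinu 0)

-- ===== PORT B =====
-- the dict literal `idx` of B
def nucIdxMap : PySem.Dict Char Int := PySem.Dict.ofList [('A', 0), ('C', 1), ('G', 2), ('T', 3)]

-- `len(dinu) == 2 and dinu[0] in idx and dinu[1] in idx`: the length-2 test and the two
-- indexings are transcribed as a match on the char list being exactly [a, b]
def dinuCode (s : String) : Int :=
  match s.toList with
  | [a, b] =>
    if nucIdxMap.contains a && nucIdxMap.contains b then
      4 * nucIdxMap.getD a 0 + nucIdxMap.getD b 0 + 1
    else 0
  | _ => 0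

def map_dinucleotide_to_int_alt (dinucleotides : List String) : List Int :=
  dinucleotides.map dinuCode

-- ===== PRECONDITION & SPEC =====
def Spec_map_dinucleotide_to_int (dinucleotides : List String) (out : List Int) : Prop := out = map_dinucleotide_to_int_alt dinucleotides
instance (dinucleotides : List String) (out : List Int) : Decidable (Spec_map_dinucleotide_to_int dinucleotides out) := by unfold Spec_map_dinucleotide_to_int; infer_instance

-- ===== CLAIM (what is proved, stated in full; the proofs are below) =====
def Claim_equal_map_dinucleotide_to_int : Prop := ∀ (dinucleotides : List String), Dom_map_dinucleotide_to_int dinucleotides → Spec_map_dinucleotide_to_int dinucleotides (map_dinucleotide_to_int dinucleotides)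

-- ===== LEMMAS AND PROOFS =====

-- per-element equivalence: table lookup = arithmetic base-4 code, for EVERY string
set_option maxHeartbeats 2000000 in
theorem getD_eq_dinuCode (s : String) : dinuMap.getD s 0 = dinuCode s := by
  have key : ∀ (t : String), (t == s) = (t.toList == s.toList) := by
    intro t; simp [String.toList_inj]
  have hitems : dinuMap.items =
      [("AA", 1), ("AC", 2), ("AG", 3), ("AT", 4),
       ("CA", 5), ("CC", 6), ("CG", 7), ("CT", 8),
       ("GA", 9), ("GC", 10), ("GG", 11), ("GT", 12),
       ("TA", 13), ("TC", 14), ("TG", 15), ("TT", 16)] := by decide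
  have t1 : ("AA" : String).toList = ['A','A'] := by decide
  have t2 : ("AC" : String).toList = ['A','C'] := by decide
  have t3 : ("AG" : String).toList = ['A','G'] := by decide
  have t4 : ("AT" : String).toList = ['A','T'] := by decide
  have t5 : ("CA" : String).toList = ['C','A'] := by decide
  have t6 : ("CC" : String).toList = ['C','C'] := by decide
  have t7 : ("CG" : String).toList = ['C','G'] := by decide
  have t8 : ("CT" : String).toList = ['C','T'] := by decide
  have t9 : ("GA" : String).toList = ['G','A'] := by decide
  have t10 : ("GC" : String).toList = ['G','C'] := by decide
  have t11 : ("GG" : String).toList = ['G','G'] := by decide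
  have t12 : ("GT" : String).toList = ['G','T'] := by decide
  have t13 : ("TA" : String).toList = ['T','A'] := by decide
  have t14 : ("TC" : String).toList = ['T','C'] := by decide
  have t15 : ("TG" : String).toList = ['T','G'] := by decide
  have t16 : ("TT" : String).toList = ['T','T'] := by decide
  have hidx : nucIdxMap = PySem.Dict.mk [('A', 0), ('C', 1), ('G', 2), ('T', 3)] :=
    PySem.Dict.ext (by decide)
  rw [dinuCode]
  rcases h : s.toList with _ | ⟨a, _ | ⟨b, _ | ⟨c, r⟩⟩⟩
  · simp [PySem.Dict.getD, PySem.Dict.get?, hitems, key, h, List.find?,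
      t1, t2, t3, t4, t5, t6, t7, t8, t9, t10, t11, t12, t13, t14, t15, t16]
  · simp [PySem.Dict.getD, PySem.Dict.get?, hitems, key, h, List.find?,
      t1, t2, t3, t4, t5, t6, t7, t8, t9, t10, t11, t12, t13, t14, t15, t16]
  · simp only [PySem.Dict.getD, PySem.Dict.get?, hitems, key, h]
    by_cases ha : 'A' = a <;> by_cases hc : 'C' = a <;> by_cases hg : 'G' = a <;> by_cases ht : 'T' = a <;>
    by_cases hb : 'A' = b <;> by_cases hbc : 'C' = b <;> by_cases hbg : 'G' = b <;> by_cases hbt : 'T' = b <;>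
      subst_vars <;>
      first
        | decide
        | (rw [List.find?_eq_none.mpr (by
              intro p hp
              fin_cases hp <;>
                simp_all [t1, t2, t3, t4, t5, t6, t7, t8, t9, t10, t11, t12, t13, t14, t15, t16])]
           simp_all [hidx, PySem.Dict.contains_mk])
  · simp [PySem.Dict.getD, PySem.Dict.get?, hitems, key, h, List.find?,
      t1, t2, t3, t4, t5, t6, t7, t8, t9, t10, t11, t12, t13, t14, t15, t16]

-- ===== VERDICT (by name: the statement is the Claim_ definition above) =====
theorem map_dinucleotide_to_int_spec : Claim_equal_map_dinucleotide_to_int := by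
  intro dinucleotides _
  unfold Spec_map_dinucleotide_to_int map_dinucleotide_to_int map_dinucleotide_to_int_alt
  exact List.map_congr_left fun s _ => getD_eq_dinuCode s
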